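-- pv_equiv track=rewrite | github.com/gyuwseong/Algorithm | algorithm/duplicate_number.py | solution
-- ===== SOURCE A (Python) =====
-- def solution(arr):
--   result = []
--   for i in range(len(arr)):
--     if arr[i] not in result:
--         result.append(arr[i])
--     else:
--         return i - arr.index(arr[i])
--     if len(result) == len(arr):
--         return -1
-- ===== SOURCE B (Python) =====
-- def solution(arr):
--     # Pass 1: group the indices of each value.
--     positions = {}
--     for i, v in enumerate(arr):
--         positions.setdefault(v, []).append(i)
--     # Pass 2: among values occurring at least twice, pick the one whose
--     # second occurrence comes earliest; the answer is second - first.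
--     best = None
--     for idxs in positions.values():
--         if len(idxs) >= 2 and (best is None or idxs[1] < best[1]):
--             best = idxs
--     if best is None:
--         return -1
--     return best[1] - best[0]
-- ===== Notes on version B (the rewrite author's own statement) =====
-- stated objective: alternative
-- what changed: Replaces A's early-exit scan (list membership plus an inner arr.index scan) by an index table grouping every value's occurrence indices, then a selection over the groups of the one with the minimal second occurrence; the answer is its second minus first index. It trades A's early exit on the first repeat for a full grouping pass that is linear even in the worst case.
-- outside the precondition, e.g. on solution([]): A returns None, B returns -1
import Mathlib
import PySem

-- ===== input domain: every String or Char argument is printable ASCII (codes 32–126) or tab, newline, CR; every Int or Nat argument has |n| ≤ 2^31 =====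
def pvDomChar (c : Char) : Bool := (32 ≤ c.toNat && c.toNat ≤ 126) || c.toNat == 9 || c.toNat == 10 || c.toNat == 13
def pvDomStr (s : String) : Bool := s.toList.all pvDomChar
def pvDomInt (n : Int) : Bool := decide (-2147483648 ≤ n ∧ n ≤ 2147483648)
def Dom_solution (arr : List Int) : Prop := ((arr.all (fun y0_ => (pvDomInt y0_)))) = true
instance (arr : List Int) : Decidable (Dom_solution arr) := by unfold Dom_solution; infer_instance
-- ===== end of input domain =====

-- B replaces A's early-exit scan (list membership + inner arr.index scan) by an index table
-- grouping each value's occurrence indices and a selection of the minimal second occurrence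
-- (an alternative, table-then-select algorithm); return-value equivalence only.

-- ===== PORT A =====
-- Python's for-loop over range(len(arr)) with the mutable list `result`;
-- the final `else 0` arm is the Python fall-through (None), reachable only for arr = [], excluded by Pre_.
def solutionGoA (arr : List Int) (i : Nat) (result : List Int) : Int :=
  if h : i < arr.length then
    if arr[i] ∈ result then
      -- `return i - arr.index(arr[i])`; index? is some because arr[i] ∈ arr, so getD 0 is exact
      (i : Int) - ((PySem.List.index? arr arr[i]).getD 0 : Int)
    else
      let result' := result ++ [arr[i]]
      if result'.length = arr.length then -1
      else solutionGoA arr (i+1) result'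
  else 0
  termination_by arr.length - i

def solution (arr : List Int) : Int := solutionGoA arr 0 []

-- ===== PORT B =====
-- Pass 1: `for i, v in enumerate(arr): positions.setdefault(v, []).append(i)`
-- (setdefault + in-place append = Dict.modify with default [])
def solutionBuild (arr : List Int) : PySem.Dict Int (List Int) :=
  (PySem.List.enumerate arr 0).foldl (fun d p => d.modify p.2 [] (· ++ [p.1])) PySem.Dict.empty

-- Pass 2: `for idxs in positions.values(): if len(idxs) >= 2 and (best is None or idxs[1] < best[1]): best = idxs`
-- idxs[1]/best[1]/best[0] are read only on lists of length ≥ 2 (checked / invariant), so getD is exact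
def solutionSelect : List (List Int) → Option (List Int) → Option (List Int)
  | [], best => best
  | g :: rest, best =>
      solutionSelect rest
        (if 2 ≤ g.length then
          match best with
          | none => some g
          | some b => if g.getD 1 0 < b.getD 1 0 then some g else some b
        else best)

def solution_alt (arr : List Int) : Int :=
  match solutionSelect (solutionBuild arr).values none with
  | none => -1
  | some b => b.getD 1 0 - b.getD 0 0

-- ===== PRECONDITION & SPEC =====
-- Pre_ excludes only the empty list, on which Python A falls through returning None (not an int).
def Pre_solution (arr : List Int) : Prop := arr ≠ []
instance (arr : List Int) : Decidable (Pre_solution arr) := by unfold Pre_solution; infer_instance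
def pvWitness_solution : List Int := [1, 2, 1]

def Spec_solution (arr : List Int) (out : Int) : Prop := out = solution_alt arr
instance (arr : List Int) (out : Int) : Decidable (Spec_solution arr out) := by unfold Spec_solution; infer_instance

-- ===== CLAIM (what is proved, stated in full; the proofs are below) =====
def Claim_equal_solution : Prop := ∀ (arr : List Int), Dom_solution arr → Pre_solution arr → Spec_solution arr (solution arr)

-- ===== LEMMAS AND PROOFS =====

-- `i` is a duplicate position: arr[i] already occurred before i
def dupP (arr : List Int) (i : Nat) : Prop := ∃ h : i < arr.length, arr[i] ∈ arr.take i

-- the occurrence-index list of value v (what solutionBuild stores under key v)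
def posOf (arr : List Int) (v : Int) : List Int :=
  ((PySem.List.enumerate arr 0).filter (fun p => p.2 == v)).map (·.1)

-- membership in a prefix vs. an earlier equal element
lemma mem_take_iff (arr : List Int) (v : Int) (i : Nat) :
    v ∈ arr.take i ↔ ∃ j, j < i ∧ ∃ hj : j < arr.length, arr[j] = v := by
  constructor
  · intro hv
    rcases List.getElem_of_mem hv with ⟨j, hj, hje⟩
    have hjl : j < arr.length := lt_of_lt_of_le hj (by simp)
    refine ⟨j, lt_of_lt_of_le hj (by simp), hjl, ?_⟩
    rw [← hje, List.getElem_take]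
  · rintro ⟨j, hji, hjl, hje⟩
    have hjt : j < (arr.take i).length := by simp [List.length_take]; omega
    have : (arr.take i)[j] = v := by rw [List.getElem_take]; exact hje
    exact this ▸ List.getElem_mem hjt

-- the first occurrence of arr[i] is < i iff arr[i] appears in arr.take i, and is i otherwise
lemma index_lt_iff (arr : List Int) (i : Nat) (hi : i < arr.length) :
    ∃ k, PySem.List.index? arr arr[i] = some k ∧ k ≤ i ∧ (arr[i] ∈ arr.take i ↔ k < i) := by
  have hmem : arr[i] ∈ arr := List.getElem_mem hi
  rcases Option.isSome_iff_exists.mp ((PySem.List.index?_isSome_iff arr arr[i]).mpr hmem) with ⟨k, hk⟩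
  rcases PySem.List.getElem_of_index?_eq_some hk with ⟨hkl, hke, hmin⟩
  have hki : k ≤ i := by
    by_contra h
    exact absurd rfl (hmin i (by omega))
  refine ⟨k, hk, hki, ?_⟩
  rw [mem_take_iff]
  constructor
  · rintro ⟨j, hji, hjl, hje⟩
    by_contra h
    have hik : k = i := by omega
    exact hmin j (by omega) hje
  · intro hk_lt
    exact ⟨k, hk_lt, hkl, hke⟩

-- solutionBuild's lookup is posOf
lemma build_getD (arr : List Int) (v : Int) :
    (solutionBuild arr).getD v [] = posOf arr v := by
  unfold solutionBuild posOf
  have h : (PySem.List.enumerate arr 0).foldl (fun d p => d.modify p.2 [] (· ++ [p.1])) PySem.Dict.empty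
      = ((PySem.List.enumerate arr 0).map Prod.swap).foldl (fun d p => d.modify p.1 [] (· ++ [p.2])) PySem.Dict.empty := by
    rw [List.foldl_map]
    simp
  rw [h, PySem.Dict.getD_foldl_modify_append, PySem.Dict.getD_empty, List.filter_map, List.map_map]
  simp [Function.comp_def]

lemma build_nodup (arr : List Int) : (solutionBuild arr).keys.Nodup := by
  unfold solutionBuild
  exact PySem.Dict.nodup_keys_foldl_modify_key (PySem.List.enumerate arr 0)
    (fun p : Int × Int => p.2) [] (fun d p => (· ++ [p.1])) PySem.Dict.empty PySem.Dict.nodup_keys_empty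

lemma build_keys (arr : List Int) : (solutionBuild arr).keys = PySem.Set.ofList arr := by
  unfold solutionBuild
  rw [PySem.Dict.keys_foldl_modify_key (key := fun p : Int × Int => p.2)]
  simp [PySem.Dict.keys_empty, PySem.List.map_snd_enumerate, PySem.Set.update_nil_left]

-- solutionBuild's values are the posOf lists of the distinct values of arr
lemma build_values (arr : List Int) :
    (solutionBuild arr).values = (PySem.Set.ofList arr).map (posOf arr) := by
  rw [PySem.Dict.values_eq_map_keys _ (build_nodup arr) [], build_keys]
  exact List.map_congr_left (fun v _ => build_getD arr v)

-- membership in posOf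
lemma mem_posOf (arr : List Int) (v : Int) (x : Int) :
    x ∈ posOf arr v ↔ ∃ k : Nat, ∃ h : k < arr.length, x = (k : Int) ∧ arr[k] = v := by
  unfold posOf
  simp only [List.mem_map, List.mem_filter, PySem.List.mem_enumerate_iff]
  constructor
  · rintro ⟨p, ⟨⟨k, hk, rfl⟩, hv⟩, rfl⟩
    simp only [beq_iff_eq] at hv
    exact ⟨k, hk, by simp, hv⟩
  · rintro ⟨k, hk, rfl, hv⟩
    exact ⟨((k : Int), arr[k]), ⟨⟨k, hk, by simp⟩, by simpa using hv⟩, rfl⟩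

-- posOf is strictly increasing
lemma posOf_pairwise (arr : List Int) (v : Int) : (posOf arr v).Pairwise (· < ·) := by
  unfold posOf
  rw [List.pairwise_map]
  exact (PySem.List.pairwise_lt_enumerate arr 0).filter _

-- a strictly increasing list whose minimum is a starts with a
lemma head_of_min {a : Int} {l : List Int} (hp : l.Pairwise (· < ·)) (hm : a ∈ l)
    (hmin : ∀ x ∈ l, a ≤ x) : ∃ t, l = a :: t := by
  cases l with
  | nil => simp at hm
  | cons h t =>
    rcases List.mem_cons.mp hm with rfl | hmt
    · exact ⟨t, rfl⟩
    · have h1 : h < a := (List.pairwise_cons.mp hp).1 a hmt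
      have h2 : a ≤ h := hmin h (List.mem_cons_self)
      omega

-- if no index is a duplicate position, every group has fewer than two elements
lemma groups_short (arr : List Int) (hno : ∀ k, ¬ dupP arr k) (v : Int) :
    (posOf arr v).length < 2 := by
  by_contra h
  push Not at h
  obtain ⟨a, b, t, hg⟩ : ∃ a b t, posOf arr v = a :: b :: t := by
    match hl : posOf arr v with
    | [] => rw [hl] at h; simp at h
    | [a] => rw [hl] at h; simp at h
    | a :: b :: t => exact ⟨a, b, t, rfl⟩
  have ha : a ∈ posOf arr v := by rw [hg]; simp
  have hb : b ∈ posOf arr v := by rw [hg]; simp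
  have hab : a < b := by
    have := posOf_pairwise arr v
    rw [hg] at this
    exact (List.pairwise_cons.mp this).1 b (by simp)
  rcases (mem_posOf arr v a).mp ha with ⟨k', hk', rfl, hvk'⟩
  rcases (mem_posOf arr v b).mp hb with ⟨k, hk, rfl, hvk⟩
  exact hno k ⟨hk, (mem_take_iff arr arr[k] k).mpr ⟨k', by exact_mod_cast hab, hk', by rw [hvk', hvk]⟩⟩

-- selection ignores short groups
lemma select_id (L : List (List Int)) (best : Option (List Int))
    (h : ∀ g ∈ L, g.length < 2) : solutionSelect L best = best := by
  induction L generalizing best with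
  | nil => rfl
  | cons g rest ih =>
    show solutionSelect rest _ = best
    rw [if_neg (by have := h g (by simp); omega)]
    exact ih _ (fun g' hg' => h g' (by simp [hg']))

-- selection returns the unique group minimising the second element
lemma select_min (g0 : List Int) (hg0 : 2 ≤ g0.length) :
    ∀ (L : List (List Int)) (best : Option (List Int)),
      (∀ g ∈ L, 2 ≤ g.length → g = g0 ∨ g0.getD 1 0 < g.getD 1 0) →
      (g0 ∈ L ∨ best = some g0) →
      (∀ b, best = some b → 2 ≤ b.length ∧ (b = g0 ∨ g0.getD 1 0 < b.getD 1 0)) →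
      solutionSelect L best = some g0 := by
  intro L
  induction L with
  | nil =>
    intro best _ hmem _
    rcases hmem with h | h
    · simp at h
    · rw [solutionSelect, h]
  | cons g rest ih =>
    intro best hall hmem hbest
    show solutionSelect rest _ = some g0
    have hallr : ∀ g' ∈ rest, 2 ≤ g'.length → g' = g0 ∨ g0.getD 1 0 < g'.getD 1 0 :=
      fun g' hg' h2 => hall g' (by simp [hg']) h2
    cases best with
    | none =>
      have hg0L : g0 ∈ g :: rest := by
        rcases hmem with h | h
        · exact h
        · simp at h
      by_cases hlen : 2 ≤ g.length
      · rw [if_pos hlen]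
        rcases hall g (by simp) hlen with rfl | hgt
        · exact ih _ hallr (Or.inr rfl) (fun b hb => by cases hb; exact ⟨hg0, Or.inl rfl⟩)
        · have hr : g0 ∈ rest := by
            rcases List.mem_cons.mp hg0L with rfl | hr
            · exact absurd hgt (lt_irrefl _)
            · exact hr
          exact ih _ hallr (Or.inl hr) (fun b hb => by cases hb; exact ⟨hlen, Or.inr hgt⟩)
      · rw [if_neg hlen]
        have hr : g0 ∈ rest := by
          rcases List.mem_cons.mp hg0L with rfl | hr
          · omega
          · exact hr
        exact ih _ hallr (Or.inl hr) (fun b hb => by cases hb)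
    | some b =>
      obtain ⟨hbl, hbor⟩ := hbest b rfl
      by_cases hlen : 2 ≤ g.length
      · rw [if_pos hlen]
        show solutionSelect rest (if g.getD 1 0 < b.getD 1 0 then some g else some b) = some g0
        rcases hall g (by simp) hlen with rfl | hgt
        · have hnb : (if g.getD 1 0 < b.getD 1 0 then some g else some b) = some g := by
            rcases hbor with rfl | hblt
            · split_ifs <;> rfl
            · rw [if_pos hblt]
          rw [hnb]
          exact ih _ hallr (Or.inr rfl) (fun b' hb' => by cases hb'; exact ⟨hg0, Or.inl rfl⟩)
        · have hnbspec : ∀ c, (if g.getD 1 0 < b.getD 1 0 then some g else some b) = some c →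
              2 ≤ c.length ∧ (c = g0 ∨ g0.getD 1 0 < c.getD 1 0) := by
            intro c hc
            split_ifs at hc with h
            · cases hc; exact ⟨hlen, Or.inr hgt⟩
            · cases hc; exact ⟨hbl, hbor⟩
          have hmem' : g0 ∈ rest ∨ (if g.getD 1 0 < b.getD 1 0 then some g else some b) = some g0 := by
            rcases hmem with hin | hb
            · rcases List.mem_cons.mp hin with rfl | hr
              · exact absurd hgt (lt_irrefl _)
              · exact Or.inl hr
            · cases hb
              right
              rw [if_neg (by omega)]
          exact ih _ hallr hmem' hnbspec
      · rw [if_neg hlen]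
        have hmem' : g0 ∈ rest ∨ some b = some g0 := by
          rcases hmem with hin | hb
          · rcases List.mem_cons.mp hin with rfl | hr
            · omega
            · exact Or.inl hr
          · exact Or.inr hb
        exact ih _ hallr hmem' hbest

-- A's loop, when no duplicate exists, runs to the length check and returns -1
lemma goA_none (arr : List Int) (hno : ∀ k, ¬ dupP arr k) :
    ∀ m i, arr.length - i ≤ m → i < arr.length → solutionGoA arr i (arr.take i) = -1 := by
  intro m
  induction m with
  | zero => intro i h hi; omega
  | succ m ih =>
    intro i _ hi
    rw [solutionGoA, dif_pos hi, if_neg (fun hmem => hno i ⟨hi, hmem⟩)]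
    have htake : arr.take i ++ [arr[i]] = arr.take (i+1) := (List.take_succ_eq_append_getElem hi).symm
    simp only [htake]
    by_cases hend : i + 1 = arr.length
    · rw [if_pos (by simp [List.length_take]; omega)]
    · rw [if_neg (by simp [List.length_take]; omega)]
      exact ih (i+1) (by omega) (by omega)

-- A's loop, with i0 the least duplicate position, returns i0 - (first index of arr[i0])
lemma goA_some (arr : List Int) (i0 : Nat) (hi0 : i0 < arr.length)
    (hdup : arr[i0] ∈ arr.take i0) (hmin : ∀ k < i0, ¬ dupP arr k)
    (j0 : Nat) (hj0 : PySem.List.index? arr arr[i0] = some j0) :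
    ∀ m i, arr.length - i ≤ m → i ≤ i0 → solutionGoA arr i (arr.take i) = (i0 : Int) - j0 := by
  intro m
  induction m with
  | zero => intro i h hile; omega
  | succ m ih =>
    intro i _ hile
    have hi : i < arr.length := by omega
    rw [solutionGoA, dif_pos hi]
    rcases index_lt_iff arr i hi with ⟨k, hk, hki, hiff⟩
    by_cases hmem : arr[i] ∈ arr.take i
    · have : i = i0 := by
        rcases Nat.lt_or_ge i i0 with h | h
        · exact absurd ⟨hi, hmem⟩ (hmin i h)
        · omega
      subst this
      rw [if_pos hmem, hj0]
      rfl
    · have hlt : i < i0 := by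
        rcases Nat.lt_or_ge i i0 with h | h
        · exact h
        · have : i = i0 := by omega
          subst this
          exact absurd hdup hmem
      rw [if_neg hmem]
      have htake : arr.take i ++ [arr[i]] = arr.take (i+1) := (List.take_succ_eq_append_getElem hi).symm
      simp only [htake]
      rw [if_neg (by simp [List.length_take]; omega)]
      exact ih (i+1) (by omega) (by omega)

-- the group of arr[i0] is j0 :: i0 :: (elements > i0)
lemma group_of_min (arr : List Int) (i0 : Nat) (hi0 : i0 < arr.length)
    (hdup : arr[i0] ∈ arr.take i0) (hmin : ∀ k < i0, ¬ dupP arr k)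
    (j0 : Nat) (hj0 : PySem.List.index? arr arr[i0] = some j0) :
    ∃ t, posOf arr arr[i0] = (j0 : Int) :: (i0 : Int) :: t := by
  rcases PySem.List.getElem_of_index?_eq_some hj0 with ⟨hj0l, hj0e, hj0min⟩
  have hj0lt : j0 < i0 := by
    rcases (mem_take_iff arr arr[i0] i0).mp hdup with ⟨j, hji, hjl, hje⟩
    by_contra h
    exact hj0min j (by omega) hje
  have hmem_cases : ∀ x ∈ posOf arr arr[i0], x = (j0 : Int) ∨ x = (i0 : Int) ∨ (i0 : Int) < x := by
    intro x hx
    rcases (mem_posOf arr arr[i0] x).mp hx with ⟨k, hk, rfl, hke⟩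
    rcases Nat.lt_or_ge k j0 with h | h
    · exact absurd hke (hj0min k h)
    rcases Nat.eq_or_lt_of_le h with rfl | hj0k
    · exact Or.inl rfl
    rcases Nat.lt_or_ge k i0 with hki0 | h2
    · exact absurd ⟨hk, (mem_take_iff arr arr[k] k).mpr ⟨j0, hj0k, hj0l, by rw [hj0e, hke]⟩⟩ (hmin k hki0)
    rcases Nat.eq_or_lt_of_le h2 with rfl | h3
    · exact Or.inr (Or.inl rfl)
    · exact Or.inr (Or.inr (by exact_mod_cast h3))
  have hj0mem : (j0 : Int) ∈ posOf arr arr[i0] := (mem_posOf _ _ _).mpr ⟨j0, hj0l, rfl, hj0e⟩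
  have hi0mem : (i0 : Int) ∈ posOf arr arr[i0] := (mem_posOf _ _ _).mpr ⟨i0, hi0, rfl, rfl⟩
  obtain ⟨t1, ht1⟩ := head_of_min (posOf_pairwise arr arr[i0]) hj0mem
    (fun x hx => by rcases hmem_cases x hx with rfl | rfl | h <;> omega)
  have hp1 : t1.Pairwise (· < ·) := by
    have := posOf_pairwise arr arr[i0]
    rw [ht1] at this
    exact (List.pairwise_cons.mp this).2
  have hgt : ∀ x ∈ t1, (j0 : Int) < x := by
    have := posOf_pairwise arr arr[i0]
    rw [ht1] at this
    exact (List.pairwise_cons.mp this).1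
  have hi0t1 : (i0 : Int) ∈ t1 := by
    rw [ht1] at hi0mem
    rcases List.mem_cons.mp hi0mem with h | h
    · exfalso; omega
    · exact h
  obtain ⟨t2, ht2⟩ := head_of_min hp1 hi0t1 (fun x hx => by
    have hxm : x ∈ posOf arr arr[i0] := by rw [ht1]; simp [hx]
    rcases hmem_cases x hxm with rfl | rfl | h
    · exact absurd (hgt _ hx) (by omega)
    · omega
    · omega)
  exact ⟨t2, by rw [ht1, ht2]⟩

-- every long group's second element is ≥ i0, with equality only for arr[i0]'s group
lemma group_second_ge (arr : List Int) (i0 : Nat) (hi0 : i0 < arr.length)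
    (hmin : ∀ k < i0, ¬ dupP arr k) (v : Int) (hlen : 2 ≤ (posOf arr v).length) :
    (i0 : Int) ≤ (posOf arr v).getD 1 0 ∧ ((posOf arr v).getD 1 0 = (i0 : Int) → v = arr[i0]) := by
  obtain ⟨a, b, t, hg⟩ : ∃ a b t, posOf arr v = a :: b :: t := by
    match hl : posOf arr v with
    | [] => rw [hl] at hlen; simp at hlen
    | [a] => rw [hl] at hlen; simp at hlen
    | a :: b :: t => exact ⟨a, b, t, rfl⟩
  have hgetD : (posOf arr v).getD 1 0 = b := by rw [hg]; rfl
  have ha : a ∈ posOf arr v := by rw [hg]; simp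
  have hb : b ∈ posOf arr v := by rw [hg]; simp
  have hab : a < b := by
    have := posOf_pairwise arr v
    rw [hg] at this
    exact (List.pairwise_cons.mp this).1 b (by simp)
  rcases (mem_posOf arr v a).mp ha with ⟨k', hk', rfl, hvk'⟩
  rcases (mem_posOf arr v b).mp hb with ⟨k, hk, rfl, hvk⟩
  have hkk' : k' < k := by exact_mod_cast hab
  have hdupk : dupP arr k := ⟨hk, (mem_take_iff arr arr[k] k).mpr ⟨k', hkk', hk', by rw [hvk', hvk]⟩⟩
  have hge : i0 ≤ k := by
    by_contra h
    exact hmin k (by omega) hdupk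
  rw [hgetD]
  refine ⟨by exact_mod_cast hge, fun he => ?_⟩
  have : k = i0 := by exact_mod_cast he
  subst this
  exact hvk.symm

-- ===== VERDICT (by name: the statement is the Claim_ definition above) =====
theorem solution_spec : Claim_equal_solution := by
  intro arr _ hpre
  have hlen : 0 < arr.length := List.length_pos_iff.mpr hpre
  unfold Spec_solution solution solution_alt
  haveI : DecidablePred (dupP arr) := fun i => by unfold dupP; infer_instance
  by_cases hex : ∃ k, dupP arr k
  · obtain ⟨hi0, hdup⟩ := Nat.find_spec hex
    set i0 := Nat.find hex with hi0def
    have hmin : ∀ k < i0, ¬ dupP arr k := fun k hk => Nat.find_min hex hk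
    rcases index_lt_iff arr i0 hi0 with ⟨j0, hj0, _, hiff⟩
    have hA : solutionGoA arr 0 [] = (i0 : Int) - j0 := by
      have := goA_some arr i0 hi0 hdup hmin j0 hj0 arr.length 0 (by omega) (by omega)
      simpa using this
    rw [hA, build_values]
    obtain ⟨t, hg0⟩ := group_of_min arr i0 hi0 hdup hmin j0 hj0
    have hg0len : 2 ≤ (posOf arr arr[i0]).length := by rw [hg0]; simp
    have hsel : solutionSelect ((PySem.Set.ofList arr).map (posOf arr)) none = some (posOf arr arr[i0]) := by
      apply select_min _ hg0len
      · intro g hgmem h2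
        rcases List.mem_map.mp hgmem with ⟨v, _, rfl⟩
        obtain ⟨hle, heq⟩ := group_second_ge arr i0 hi0 hmin v h2
        by_cases hif : (posOf arr v).getD 1 0 = (i0 : Int)
        · exact Or.inl (by rw [heq hif])
        · right
          rw [hg0]
          show ((j0 : Int) :: (i0 : Int) :: t).getD 1 0 < _
          have : ((j0 : Int) :: (i0 : Int) :: t).getD 1 0 = (i0 : Int) := rfl
          rw [this]
          omega
      · exact Or.inl (List.mem_map_of_mem ((PySem.Set.mem_ofList _ _).mpr (List.getElem_mem hi0)))
      · intro b hb
        cases hb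
    rw [hsel, hg0]
    rfl
  · push Not at hex
    have hA : solutionGoA arr 0 [] = -1 := by
      have := goA_none arr hex arr.length 0 (by omega) hlen
      simpa using this
    rw [hA, build_values, select_id _ _ (fun g hg => by
      rcases List.mem_map.mp hg with ⟨v, _, rfl⟩
      exact groups_short arr hex v)]
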